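-- pv_equiv track=rewrite | github.com/ashleyoldershaw/all-roads-lead-to-rome | search.py | search
-- ===== SOURCE A (Python) =====
-- def get_index_for_word(word, index):
--     # returns the index entry for a certain word, if it exists
--
--     if index.get(word):
--         return {i[1]: i[0] for i in index.get(word)}
--     else:
--         return
--
-- def search(search_index, terms):
--     # searches the index for pages containing all the search terms, rank by count on page
--
--     index_terms = [get_index_for_word(term, search_index) for term in terms]
--     search_results = []
--
--     # seeing as we want an intersection, if any of them are empty return no results
--     for term in index_terms:
--         if term is None:
--             return
--
--     # multiply counts together to get index value, if it's not there multiply by 0 to remove the url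
--     for url in index_terms[0]:
--         multiplier = index_terms[0][url]
--         for term in index_terms[1:]:
--             multiplier *= term.get(url, 0)
--
--         if multiplier:
--             search_results.append([url, multiplier])
--
--     # if there's no intersection return nothing
--     if not search_results:
--         return
--
--     # sort descending by index number and return
--     search_results.sort(key=lambda x: x[1], reverse=True)
--
--     return search_results
-- ===== SOURCE B (Python) =====
-- def term_counts(word, index):
--     # per-term {url: count} map, or None when the word has no (non-empty) posting list
--     postings = index.get(word)
--     if not postings:
--         return None
--     return {url: count for count, url in postings}
--
-- def search(search_index, terms):
--     # fold a shrinking intersection map through the terms instead of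
--     # rescanning every term for each url of the first term
--     index_terms = [term_counts(t, search_index) for t in terms]
--     if any(t is None for t in index_terms):
--         return None
--     current = index_terms[0]
--     for term in index_terms[1:]:
--         current = {url: v * term[url] for url, v in current.items() if url in term}
--     results = [[url, v] for url, v in current.items() if v]
--     if not results:
--         return None
--     results.sort(key=lambda x: x[1], reverse=True)
--     return results
-- ===== Notes on version B (the rewrite author's own statement) =====
-- stated objective: alternative
-- what changed: Instead of rescanning every later term's dict for each url of the first term, B folds a shrinking intersection dict through the terms ({url: v*term[url]} comprehensions) and filters zero products at the end.
import Mathlib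
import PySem

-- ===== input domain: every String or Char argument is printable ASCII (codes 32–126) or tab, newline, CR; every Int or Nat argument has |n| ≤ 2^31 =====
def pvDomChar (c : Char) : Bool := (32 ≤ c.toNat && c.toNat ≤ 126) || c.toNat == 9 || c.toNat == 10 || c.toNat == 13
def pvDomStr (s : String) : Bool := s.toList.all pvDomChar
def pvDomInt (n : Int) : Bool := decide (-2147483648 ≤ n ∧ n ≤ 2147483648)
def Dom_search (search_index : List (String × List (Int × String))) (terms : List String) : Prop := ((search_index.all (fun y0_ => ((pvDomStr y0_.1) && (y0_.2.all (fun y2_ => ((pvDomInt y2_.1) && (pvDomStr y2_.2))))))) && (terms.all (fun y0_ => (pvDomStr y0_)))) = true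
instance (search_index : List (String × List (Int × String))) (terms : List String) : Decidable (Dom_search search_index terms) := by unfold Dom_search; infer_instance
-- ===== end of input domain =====

-- B replaces A's rescan of every term for each url of the first term by folding a shrinking
-- intersection map through the terms (objective: alternative decomposition, same exact results).

-- ===== PORT A =====
def get_index_for_word (word : String) (index : List (String × List (Int × String))) : Option (PySem.Dict String Int) :=
  match (PySem.Dict.mk index).get? word with
  | some postings =>
      if postings ≠ [] then
        some (postings.foldl (fun d i => d.insert i.2 i.1) PySem.Dict.empty)
      else none
  | none => none

def search (search_index : List (String × List (Int × String))) (terms : List String) : Option (List (String × Int)) :=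
  let index_terms := terms.map (fun term => get_index_for_word term search_index)
  if index_terms.any (fun t => t.isNone) then none
  else
    match index_terms with
    | [] => none  -- Python raises IndexError at index_terms[0] here; excluded by Pre_search
    | t0o :: rest_o =>
      let t0 := t0o.getD PySem.Dict.empty
      let rest := rest_o.map (fun t => t.getD PySem.Dict.empty)
      let search_results := t0.keys.foldl (fun acc url =>
        let multiplier := rest.foldl (fun m term => m * term.getD url 0) (t0.getD url 0)
        if multiplier ≠ 0 then acc ++ [(url, multiplier)] else acc) ([] : List (String × Int))
      if search_results = [] then none
      else some (PySem.List.sorted search_results (fun x => x.2) true)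

-- ===== PORT B =====
def term_counts (word : String) (index : List (String × List (Int × String))) : Option (PySem.Dict String Int) :=
  let postings := (PySem.Dict.mk index).get? word
  match postings with
  | none => none
  | some l =>
      if l = [] then none
      else some (l.foldl (fun d p => d.insert p.2 p.1) PySem.Dict.empty)

def search_alt (search_index : List (String × List (Int × String))) (terms : List String) : Option (List (String × Int)) :=
  let index_terms := terms.map (fun t => term_counts t search_index)
  if index_terms.any (fun t => t.isNone) then none
  else
    match index_terms with
    | [] => none  -- Python raises IndexError at index_terms[0] here; excluded by Pre_search
    | c0 :: rest_o =>
      -- the dict comprehension: keys of `cur` are distinct, so it is exactly this filterMap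
      let current := rest_o.foldl (fun cur t_o =>
          let term := t_o.getD PySem.Dict.empty
          PySem.Dict.mk (cur.items.filterMap (fun p =>
            (term.get? p.1).map (fun w => (p.1, p.2 * w)))))
        (c0.getD PySem.Dict.empty)
      let results := current.items.filter (fun p => p.2 ≠ 0)
      if results = [] then none
      else some (PySem.List.sorted results (fun x => x.2) true)

-- ===== PRECONDITION & SPEC =====
-- Pre_ excludes only terms = [], on which the Python A (and B) raises IndexError at index_terms[0].
def Pre_search (search_index : List (String × List (Int × String))) (terms : List String) : Prop := terms ≠ []
instance (search_index : List (String × List (Int × String))) (terms : List String) : Decidable (Pre_search search_index terms) := by unfold Pre_search; infer_instance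
def pvWitness_search : (List (String × List (Int × String))) × List String := ([("rome", [(2, "u.com"), (1, "v.com")]), ("road", [(3, "u.com")])], ["rome", "road"])

def Spec_search (search_index : List (String × List (Int × String))) (terms : List String) (out : Option (List (String × Int))) : Prop := out = search_alt search_index terms
instance (search_index : List (String × List (Int × String))) (terms : List String) (out : Option (List (String × Int))) : Decidable (Spec_search search_index terms out) := by unfold Spec_search; infer_instance

-- ===== CLAIM (what is proved, stated in full; the proofs are below) =====
def Claim_equal_search : Prop := ∀ (search_index : List (String × List (Int × String))) (terms : List String), Dom_search search_index terms → Pre_search search_index terms → Spec_search search_index terms (search search_index terms)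

-- ===== LEMMAS AND PROOFS =====

theorem tc_eq (word : String) (index : List (String × List (Int × String))) :
    term_counts word index = get_index_for_word word index := by
  unfold term_counts get_index_for_word
  cases (PySem.Dict.mk index).get? word with
  | none => rfl
  | some l => by_cases h : l = [] <;> simp [h]

theorem foldl_mul_zero (ts : List (PySem.Dict String Int)) (k : String) :
    ts.foldl (fun m t => m * t.getD k 0) 0 = 0 := by
  induction ts with
  | nil => rfl
  | cons t ts ih => simpa using ih

theorem foldl_mul_of_absent (ts : List (PySem.Dict String Int)) (k : String) (m : Int)
    (h : ∃ t ∈ ts, t.get? k = none) :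
    ts.foldl (fun m t => m * t.getD k 0) m = 0 := by
  induction ts generalizing m with
  | nil => simp at h
  | cons t ts ih =>
    rcases h with ⟨t', ht', hnone⟩
    rcases List.mem_cons.mp ht' with rfl | hmem
    · rw [List.foldl_cons, PySem.Dict.getD_of_get?_eq_none _ _ hnone, mul_zero]
      exact foldl_mul_zero ts k
    · exact ih _ ⟨t', hmem, hnone⟩

theorem map_filter_eq_filterMap {α β : Type} (l : List α) (p : α → Bool) (f : α → β) :
    (l.filter p).map f = l.filterMap (fun a => if p a then some (f a) else none) := by
  induction l with
  | nil => rfl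
  | cons a l ih => by_cases h : p a <;> simp [h, ih]

theorem b_fold_items (ts : List (PySem.Dict String Int)) (l : List (String × Int)) :
    ts.foldl (fun l' term => l'.filterMap (fun p => (term.get? p.1).map (fun w => (p.1, p.2 * w)))) l
    = l.filterMap (fun p =>
        if ts.all (fun t => (t.get? p.1).isSome) then
          some (p.1, ts.foldl (fun m t => m * t.getD p.1 0) p.2)
        else none) := by
  induction ts generalizing l with
  | nil => simp
  | cons t ts ih =>
    rw [List.foldl_cons, ih, List.filterMap_filterMap]
    refine List.filterMap_congr (fun p _ => ?_)
    cases hg : t.get? p.1 with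
    | none => simp [hg]
    | some w =>
      simp only [hg, List.all_cons, Option.isSome_some, Bool.true_and, Option.map_some,
        Option.bind_some, List.foldl_cons, PySem.Dict.getD_of_get?_eq_some _ _ hg]

theorem dict_nodup_of_gifw (word : String) (index : List (String × List (Int × String)))
    (d : PySem.Dict String Int) (h : get_index_for_word word index = some d) :
    d.keys.Nodup := by
  unfold get_index_for_word at h
  cases hg : (PySem.Dict.mk index).get? word with
  | none => rw [hg] at h; exact absurd h (by simp)
  | some l =>
    rw [hg] at h
    dsimp only at h
    by_cases hl : l = []
    · rw [if_neg (by simp [hl])] at h; exact absurd h (by simp)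
    · rw [if_pos hl, Option.some_inj] at h
      subst h
      exact PySem.Dict.nodup_keys_foldl_insert_key l (fun p => p.2) (fun _ p => p.1)
        PySem.Dict.empty PySem.Dict.nodup_keys_empty

theorem b_fold_dict_items (os : List (Option (PySem.Dict String Int))) (d : PySem.Dict String Int) :
    (os.foldl (fun cur t_o =>
        PySem.Dict.mk (cur.items.filterMap (fun p =>
          ((t_o.getD PySem.Dict.empty).get? p.1).map (fun w => (p.1, p.2 * w))))) d).items
    = (os.map (fun t => t.getD PySem.Dict.empty)).foldl
        (fun l' term => l'.filterMap (fun p => (term.get? p.1).map (fun w => (p.1, p.2 * w)))) d.items := by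
  rw [List.foldl_map]
  induction os generalizing d with
  | nil => rfl
  | cons o os ih => rw [List.foldl_cons, List.foldl_cons, ih]

theorem main_loop (t0 : PySem.Dict String Int) (hn : t0.keys.Nodup)
    (rest : List (PySem.Dict String Int)) :
    t0.keys.foldl (fun acc url =>
        let multiplier := rest.foldl (fun m term => m * term.getD url 0) (t0.getD url 0)
        if multiplier ≠ 0 then acc ++ [(url, multiplier)] else acc) ([] : List (String × Int))
    = (rest.foldl (fun l' term => l'.filterMap (fun p => (term.get? p.1).map (fun w => (p.1, p.2 * w)))) t0.items).filter (fun p => p.2 ≠ 0) := by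
  have hkeys : t0.keys = t0.items.map (fun p => p.1) := rfl
  rw [hkeys, List.foldl_map]
  have hbody : (fun (acc : List (String × Int)) (p : String × Int) =>
      let multiplier := rest.foldl (fun m term => m * term.getD p.1 0) (t0.getD p.1 0)
      if multiplier ≠ 0 then acc ++ [(p.1, multiplier)] else acc)
    = (fun acc p =>
      if (fun (q : String × Int) => !(rest.foldl (fun m term => m * term.getD q.1 0) (t0.getD q.1 0) == 0)) p = true
      then acc ++ [(fun (q : String × Int) => (q.1, rest.foldl (fun m term => m * term.getD q.1 0) (t0.getD q.1 0))) p] else acc) := by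
    funext acc p
    by_cases h : rest.foldl (fun m term => m * term.getD p.1 0) (t0.getD p.1 0) = 0 <;> simp [h]
  rw [hbody, PySem.List.foldl_append_if, List.nil_append, map_filter_eq_filterMap,
    b_fold_items, List.filter_filterMap]
  refine List.filterMap_congr (fun p hp => ?_)
  obtain ⟨k, v⟩ := p
  have hkv : t0.getD k 0 = v := PySem.Dict.getD_of_mem_items t0 hp hn 0
  simp only [hkv]
  by_cases hall : rest.all (fun t => (t.get? k).isSome) = true
  · rw [if_pos hall]
    by_cases hF : rest.foldl (fun m term => m * term.getD k 0) v = 0 <;>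
      simp [Option.filter, hF]
  · rw [if_neg hall]
    have : ∃ t ∈ rest, t.get? k = none := by
      rw [List.all_eq_true] at hall
      push Not at hall
      obtain ⟨t, ht, hns⟩ := hall
      exact ⟨t, ht, by simpa [Option.not_isSome_iff_eq_none] using hns⟩
    have hF : rest.foldl (fun m term => m * term.getD k 0) v = 0 :=
      foldl_mul_of_absent rest k v this
    simp [Option.filter, hF]

-- ===== VERDICT (by name: the statement is the Claim_ definition above) =====
theorem search_spec : Claim_equal_search := by
  intro si terms hdom hpre
  unfold Spec_search search search_alt
  simp only [tc_eq]
  cases terms with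
  | nil => exact absurd rfl hpre
  | cons t ts =>
    simp only [List.map_cons]
    by_cases hg : ((get_index_for_word t si :: ts.map (fun term => get_index_for_word term si)).any (fun x => x.isNone)) = true
    · simp only [hg, if_true]
    · simp only [hg, if_false, Bool.false_eq_true]
      have hn : ((get_index_for_word t si).getD PySem.Dict.empty).keys.Nodup := by
        cases h : get_index_for_word t si with
        | none => simpa [h] using PySem.Dict.nodup_keys_empty
        | some d => simpa [h] using dict_nodup_of_gifw t si d h
      rw [b_fold_dict_items, ← main_loop _ hn]
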